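-- pv_equiv track=rewrite | github.com/Axiom-Cyber-LLC/Model-Manager-HF-Kaggle-Search | Prepare_models_for_Lmstudio.py | _classify_tokens
-- ===== SOURCE A (Python) =====
-- COMPOUND_VOCAB = [
--     # Compressed quants per user key
--     (["iq4", "xs"], "I4XS"),
--     (["iq4", "nl"], "I4NL"),
--     (["q4", "k", "m"], "4KM"),
--     (["q4", "k", "s"], "4KS"),
--     (["q4", "k", "l"], "4KL"),
--     (["q4", "0"], "4"),
--     (["q4", "1"], "41"),
--     # Preserved quants (not in user's map but keep recognizable)
--     (["q3", "k", "s"], "Q3_K_S"),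
--     (["q3", "k", "m"], "Q3_K_M"),
--     (["q3", "k", "l"], "Q3_K_L"),
--     (["q5", "k", "s"], "Q5_K_S"),
--     (["q5", "k", "m"], "Q5_K_M"),
--     (["q2", "k"], "Q2_K"),
--     (["q6", "k"], "Q6_K"),
--     (["q8", "0"], "Q8_0"),
--     # Word compounds
--     (["semantic", "router"], "SR"),
--     (["distilled", "instruct"], "DI"),
--     (["distilled", "instruction"], "DI"),
--     (["distill", "instruct"], "DI"),
-- ]
--
-- SINGLE_VOCAB = {
--     "distilled": "D", "distill": "D",
--     "instruct": "I", "instruction": "I", "instructed": "I",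
--     "reasoning": "RE",
--     "intent": "i",
--     "classifier": "C",
--     "merged": "M",
--     "large": "LG",
--     "lite": "L",
--     "turbo": "TU",
--     "base": "B",
--     "mini": "m",
--     "tokenizer": "T",
--     "testing": "t",
--     "coder": "Co", "coding": "Co", "code": "Co",
--     # Preserved single-token quants
--     "f16": "F16", "f32": "F32", "bf16": "BF16", "fp16": "FP16",
-- }
--
-- def _classify_tokens(tokens):
--     """Match tokens against vocab. Returns list of (out_str, kind) with kind ∈ {single, multi, body}."""
--     out = []
--     i = 0
--     while i < len(tokens):
--         matched = False
--         # Try compound (multi-token) patterns first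
--         for pattern, code in COMPOUND_VOCAB:
--             n = len(pattern)
--             window = [t.lower() for t in tokens[i:i + n]]
--             if window == pattern:
--                 out.append((code, "single" if len(code) == 1 else "multi"))
--                 i += n
--                 matched = True
--                 break
--         if matched:
--             continue
--         tok = tokens[i]
--         if tok.lower() in SINGLE_VOCAB:
--             code = SINGLE_VOCAB[tok.lower()]
--             out.append((code, "single" if len(code) == 1 else "multi"))
--         else:
--             out.append((tok, "body"))
--         i += 1
--     return out
-- ===== SOURCE B (Python) =====
-- COMPOUND_VOCAB = [
--     (["iq4", "xs"], "I4XS"),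
--     (["iq4", "nl"], "I4NL"),
--     (["q4", "k", "m"], "4KM"),
--     (["q4", "k", "s"], "4KS"),
--     (["q4", "k", "l"], "4KL"),
--     (["q4", "0"], "4"),
--     (["q4", "1"], "41"),
--     (["q3", "k", "s"], "Q3_K_S"),
--     (["q3", "k", "m"], "Q3_K_M"),
--     (["q3", "k", "l"], "Q3_K_L"),
--     (["q5", "k", "s"], "Q5_K_S"),
--     (["q5", "k", "m"], "Q5_K_M"),
--     (["q2", "k"], "Q2_K"),
--     (["q6", "k"], "Q6_K"),
--     (["q8", "0"], "Q8_0"),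
--     (["semantic", "router"], "SR"),
--     (["distilled", "instruct"], "DI"),
--     (["distilled", "instruction"], "DI"),
--     (["distill", "instruct"], "DI"),
-- ]
--
-- SINGLE_VOCAB = {
--     "distilled": "D", "distill": "D",
--     "instruct": "I", "instruction": "I", "instructed": "I",
--     "reasoning": "RE",
--     "intent": "i",
--     "classifier": "C",
--     "merged": "M",
--     "large": "LG",
--     "lite": "L",
--     "turbo": "TU",
--     "base": "B",
--     "mini": "m",
--     "tokenizer": "T",
--     "testing": "t",
--     "coder": "Co", "coding": "Co", "code": "Co",
--     "f16": "F16", "f32": "F32", "bf16": "BF16", "fp16": "FP16",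
-- }
--
-- # Index: first pattern token -> ordered [(rest-of-pattern, code)], built once.
-- _INDEX = {}
-- for _pat, _code in COMPOUND_VOCAB:
--     _INDEX.setdefault(_pat[0], []).append((_pat[1:], _code))
--
--
-- def _classify_tokens(tokens):
--     """Lowercase once, then scan with a first-token index over the compound vocab."""
--     lows = [t.lower() for t in tokens]
--     out = []
--     i = 0
--     n = len(tokens)
--     while i < n:
--         head = lows[i]
--         hit = None
--         for rest, code in _INDEX.get(head, ()):
--             if lows[i + 1:i + 1 + len(rest)] == rest:
--                 hit = (rest, code)
--                 break
--         if hit is not None: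
--             rest, code = hit
--             out.append((code, "single" if len(code) == 1 else "multi"))
--             i += 1 + len(rest)
--         else:
--             code = SINGLE_VOCAB.get(head)
--             if code is None:
--                 out.append((tokens[i], "body"))
--             else:
--                 out.append((code, "single" if len(code) == 1 else "multi"))
--             i += 1
--     return out
-- ===== Notes on version B (the rewrite author's own statement) =====
-- stated objective: alternative
-- what changed: B lowercases all tokens once up front and replaces A's per-position scan of the whole compound vocabulary (re-lowering a window per pattern) by a lookup in a first-token index built once, scanning only the candidate patterns for that first token.
import Mathlib
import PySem

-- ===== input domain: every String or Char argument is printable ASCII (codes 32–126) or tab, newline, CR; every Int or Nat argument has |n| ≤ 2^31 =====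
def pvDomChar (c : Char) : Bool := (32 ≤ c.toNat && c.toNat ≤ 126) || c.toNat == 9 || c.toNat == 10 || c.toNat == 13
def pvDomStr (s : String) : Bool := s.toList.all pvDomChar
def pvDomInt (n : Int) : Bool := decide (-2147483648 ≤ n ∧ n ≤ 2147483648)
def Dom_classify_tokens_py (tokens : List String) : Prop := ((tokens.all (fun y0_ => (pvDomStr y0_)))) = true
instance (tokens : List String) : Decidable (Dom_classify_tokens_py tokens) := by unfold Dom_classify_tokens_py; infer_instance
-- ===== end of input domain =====

-- B replaces A's scan of the full compound vocabulary at every position by a one-time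
-- lowercase pass plus a first-token index into the compound vocabulary (objective: alternative).

-- ===== PORT A =====
def pvCompound : List (List String × String) := [
  (["iq4", "xs"], "I4XS"),
  (["iq4", "nl"], "I4NL"),
  (["q4", "k", "m"], "4KM"),
  (["q4", "k", "s"], "4KS"),
  (["q4", "k", "l"], "4KL"),
  (["q4", "0"], "4"),
  (["q4", "1"], "41"),
  (["q3", "k", "s"], "Q3_K_S"),
  (["q3", "k", "m"], "Q3_K_M"),
  (["q3", "k", "l"], "Q3_K_L"),
  (["q5", "k", "s"], "Q5_K_S"),
  (["q5", "k", "m"], "Q5_K_M"),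
  (["q2", "k"], "Q2_K"),
  (["q6", "k"], "Q6_K"),
  (["q8", "0"], "Q8_0"),
  (["semantic", "router"], "SR"),
  (["distilled", "instruct"], "DI"),
  (["distilled", "instruction"], "DI"),
  (["distill", "instruct"], "DI")]

def pvSingle : PySem.Dict String String := PySem.Dict.ofList [
  ("distilled", "D"), ("distill", "D"),
  ("instruct", "I"), ("instruction", "I"), ("instructed", "I"),
  ("reasoning", "RE"),
  ("intent", "i"),
  ("classifier", "C"),
  ("merged", "M"),
  ("large", "LG"),
  ("lite", "L"),
  ("turbo", "TU"),
  ("base", "B"),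
  ("mini", "m"),
  ("tokenizer", "T"),
  ("testing", "t"),
  ("coder", "Co"), ("coding", "Co"), ("code", "Co"),
  ("f16", "F16"), ("f32", "F32"), ("bf16", "BF16"), ("fp16", "FP16")]

-- every compound pattern is non-empty (used for termination of A's while loop)
theorem pvCompound_pos : ∀ pc ∈ pvCompound, 0 < pc.1.length := by decide

-- A's while loop: at position i, try every compound pattern in order against the
-- lowered window tokens[i:i+n] (for-loop with break = find?), else the single vocab.
def pvLoopA (tokens : List String) (i : Nat) : List (String × String) :=
  if h : i < tokens.length then
    match hf : pvCompound.find? (fun pc =>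
        (PySem.List.slice tokens (some (i : Int)) (some ((i : Int) + (pc.1.length : Int)))).map
          PySem.Str.lower == pc.1) with
    | some pc =>
        (pc.2, if PySem.Str.len pc.2 == 1 then "single" else "multi") :: pvLoopA tokens (i + pc.1.length)
    | none =>
        match pvSingle.get? (PySem.Str.lower tokens[i]) with
        | some code => (code, if PySem.Str.len code == 1 then "single" else "multi") :: pvLoopA tokens (i + 1)
        | none => (tokens[i], "body") :: pvLoopA tokens (i + 1)
  else []
termination_by tokens.length - i
decreasing_by
  all_goals first
    | (have := pvCompound_pos _ (List.mem_of_find?_eq_some hf); omega)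
    | omega

def classify_tokens_py (tokens : List String) : List (String × String) := pvLoopA tokens 0

-- ===== PORT B =====
-- first-token index over the compound vocab (Source B's setdefault/append loop)
def pvIndex : PySem.Dict String (List (List String × String)) :=
  pvCompound.foldl
    (fun d pc => d.modify (pc.1.headD "") [] (fun g => g ++ [(pc.1.tail, pc.2)]))
    PySem.Dict.empty

-- B's while loop: look up lows[i] in the index, scan only those candidates.
def pvLoopB (tokens lows : List String) (i : Nat) : List (String × String) :=
  if h : i < tokens.length then
    let head := lows.getD i ""
    match (pvIndex.getD head []).find? (fun rc =>
        PySem.List.slice lows (some ((i + 1 : Nat) : Int))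
          (some (((i + 1 : Nat) : Int) + (rc.1.length : Int))) == rc.1) with
    | some rc =>
        (rc.2, if PySem.Str.len rc.2 == 1 then "single" else "multi") :: pvLoopB tokens lows (i + (1 + rc.1.length))
    | none =>
        match pvSingle.get? head with
        | some code => (code, if PySem.Str.len code == 1 then "single" else "multi") :: pvLoopB tokens lows (i + 1)
        | none => (tokens[i], "body") :: pvLoopB tokens lows (i + 1)
  else []
termination_by tokens.length - i

def classify_tokens_py_alt (tokens : List String) : List (String × String) :=
  pvLoopB tokens (tokens.map PySem.Str.lower) 0

-- ===== PRECONDITION & SPEC =====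
def Spec_classify_tokens_py (tokens : List String) (out : List (String × String)) : Prop := out = classify_tokens_py_alt tokens
instance (tokens : List String) (out : List (String × String)) : Decidable (Spec_classify_tokens_py tokens out) := by unfold Spec_classify_tokens_py; infer_instance

-- ===== CLAIM (what is proved, stated in full; the proofs are below) =====
def Claim_equal_classify_tokens_py : Prop := ∀ (tokens : List String), Dom_classify_tokens_py tokens → Spec_classify_tokens_py tokens (classify_tokens_py tokens)

-- ===== LEMMAS AND PROOFS =====

theorem pv_find?_congr {α : Type} (l : List α) (p q : α → Bool)
    (h : ∀ x ∈ l, p x = q x) : l.find? p = l.find? q := by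
  induction l with
  | nil => rfl
  | cons a l ih =>
    simp only [List.find?]
    rw [h a (by simp)]
    cases q a with
    | true => rfl
    | false => exact ih (fun x hx => h x (by simp [hx]))

-- grouping a find? over patterns by their first element
theorem pv_find_group (l : List (List String × String)) (k : String) (q : List String → Bool)
    (hne : ∀ pc ∈ l, pc.1 ≠ []) :
    l.find? (fun pc => (pc.1.headD "" == k) && q pc.1.tail)
      = (((l.filter (fun pc => pc.1.headD "" == k)).map
          (fun pc => (pc.1.tail, pc.2))).find? (fun rc => q rc.1)).map
            (fun rc => (k :: rc.1, rc.2)) := by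
  induction l with
  | nil => rfl
  | cons a l ih =>
    obtain ⟨pat, c⟩ := a
    cases pat with
    | nil => exact absurd rfl (hne ([], c) (by simp))
    | cons p0 rest =>
      have ih' := ih (fun pc hpc => hne pc (by simp [hpc]))
      simp only [List.find?_cons, List.filter_cons, List.headD_cons, List.tail_cons]
      by_cases hb : p0 = k
      · subst hb
        simp only [BEq.rfl, Bool.true_and]
        cases hq : q rest with
        | true => simp [hq]
        | false => simpa [List.find?_cons, hq] using ih'
      · have hb' : (p0 == k) = false := by simp [hb]
        simpa [hb'] using ih'

theorem pvIndex_getD (k : String) :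
    pvIndex.getD k []
      = (pvCompound.filter (fun pc => pc.1.headD "" == k)).map (fun pc => (pc.1.tail, pc.2)) := by
  have h1 : pvIndex
      = ((pvCompound.map (fun pc => (pc.1.headD "", (pc.1.tail, pc.2)))).foldl
          (fun d p => d.modify p.1 [] (fun g => g ++ [p.2])) PySem.Dict.empty) := by
    rw [List.foldl_map]
    rfl
  rw [h1, PySem.Dict.getD_foldl_modify_append]
  simp [PySem.Dict.getD_empty, List.filter_map, List.map_map, Function.comp_def]

theorem pv_loop_eq (tokens : List String) :
    ∀ (d i : Nat), tokens.length - i ≤ d →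
      pvLoopA tokens i = pvLoopB tokens (tokens.map PySem.Str.lower) i := by
  intro d
  induction d with
  | zero =>
    intro i hi
    rw [pvLoopA.eq_def, pvLoopB.eq_def]
    have : ¬ i < tokens.length := by omega
    simp [this]
  | succ d ih =>
    intro i hi
    by_cases h : i < tokens.length
    · have hL : i < (tokens.map PySem.Str.lower).length := by simpa using h
      set L := tokens.map PySem.Str.lower with hLdef
      have hhead : L.getD i "" = L[i] := List.getD_eq_getElem L "" hL
      have hdrop : L.drop i = L[i] :: L.drop (i + 1) := List.drop_eq_getElem_cons hL
      have hgl : L[i] = PySem.Str.lower tokens[i] := by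
        simp [hLdef]
      have hs : ∀ (n : Nat), PySem.List.slice L (some ((i + 1 : Nat) : Int))
          (some (((i + 1 : Nat) : Int) + (n : Int))) = (L.drop (i + 1)).take n := by
        intro n; rw [PySem.List.slice_natCast_add]
      -- A's find? over the whole vocab = B's find? over the index group, re-tagged
      have hfind :
          pvCompound.find? (fun pc =>
              (PySem.List.slice tokens (some (i : Int)) (some ((i : Int) + (pc.1.length : Int)))).map
                PySem.Str.lower == pc.1)
            = ((pvIndex.getD L[i] []).find? (fun rc =>
                PySem.List.slice L (some ((i + 1 : Nat) : Int))
                  (some (((i + 1 : Nat) : Int) + (rc.1.length : Int))) == rc.1)).map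
                (fun rc => (L[i] :: rc.1, rc.2)) := calc
        pvCompound.find? (fun pc =>
              (PySem.List.slice tokens (some (i : Int)) (some ((i : Int) + (pc.1.length : Int)))).map
                PySem.Str.lower == pc.1)
            = pvCompound.find? (fun pc => (pc.1.headD "" == L[i]) &&
                ((L.drop (i + 1)).take pc.1.tail.length == pc.1.tail)) := by
              apply pv_find?_congr
              intro pc hpc
              obtain ⟨pat, c⟩ := pc
              cases pat with
              | nil => exact absurd (pvCompound_pos (([], c)) hpc) (by simp)
              | cons p0 rest =>
                simp only [PySem.List.slice_natCast_add, List.map_take, List.map_drop, ← hLdef]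
                rw [hdrop, List.length_cons, List.take_succ_cons]
                have hcomm : (L[i] == p0) = (p0 == L[i]) := by
                  by_cases hx : L[i] = p0
                  · simp [hx]
                  · have hx' : ¬ p0 = L[i] := fun hy => hx hy.symm
                    simp [hx, hx']
                simp [List.cons_beq_cons, List.tail_cons, hcomm]
        _ = (((pvCompound.filter (fun pc => pc.1.headD "" == L[i])).map
                (fun pc => (pc.1.tail, pc.2))).find?
                  (fun rc => (L.drop (i + 1)).take rc.1.length == rc.1)).map
                (fun rc => (L[i] :: rc.1, rc.2)) := by
              apply pv_find_group pvCompound L[i]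
                (fun t => (L.drop (i + 1)).take t.length == t)
              intro pc hpc hnil
              have := pvCompound_pos pc hpc
              simp [hnil] at this
        _ = ((pvIndex.getD L[i] []).find? (fun rc =>
                PySem.List.slice L (some ((i + 1 : Nat) : Int))
                  (some (((i + 1 : Nat) : Int) + (rc.1.length : Int))) == rc.1)).map
                (fun rc => (L[i] :: rc.1, rc.2)) := by
              rw [pvIndex_getD]
              congr 1
              apply pv_find?_congr
              intro rc _
              rw [hs rc.1.length]
      rw [pvLoopA.eq_def, pvLoopB.eq_def]
      simp only [dif_pos h, hhead]
      cases hfB : (List.find? (fun rc =>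
          PySem.List.slice L (some ((i + 1 : Nat) : Int))
            (some (((i + 1 : Nat) : Int) + (rc.1.length : Int))) == rc.1)
          (pvIndex.getD L[i] [])) with
      | some rc =>
        rw [hfB] at hfind
        simp only [Option.map_some] at hfind
        split
        · next pc heq =>
          rw [hfind] at heq
          injection heq with heq
          subst heq
          simp only [List.length_cons]
          have h1 : i + (rc.1.length + 1) = i + (1 + rc.1.length) := by omega
          rw [h1, ih _ (by omega)]
        · next hnone =>
          rw [hfind] at hnone
          simp at hnone
      | none =>
        rw [hfB] at hfind
        simp only [Option.map_none] at hfind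
        split
        · next pc heq =>
          rw [hfind] at heq
          exact absurd heq (by simp)
        · next hnone =>
          rw [hgl]
          have hrec := ih (i + 1) (by omega)
          cases pvSingle.get? (PySem.Str.lower tokens[i]) <;> simp [hrec]
    · rw [pvLoopA.eq_def, pvLoopB.eq_def]
      simp [h]

-- ===== VERDICT (by name: the statement is the Claim_ definition above) =====
theorem classify_tokens_py_spec : Claim_equal_classify_tokens_py := by
  intro tokens _
  unfold Spec_classify_tokens_py classify_tokens_py classify_tokens_py_alt
  exact pv_loop_eq tokens tokens.length 0 (by omega)
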